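-- pv_equiv track=rewrite | github.com/mkranzlein/HiPool | src/hipool/curiam_reader.py | get_subword_mask
-- ===== SOURCE A (Python) =====
-- def get_subword_mask(sentence_word_ids: list[int]):
--     """Returns mask indicating whether subwords are first in a token.
--
--     1 if subword is first part of token else 0.
--
--     """
--     subword_mask = []
--     current_word = None
--     for word_id in sentence_word_ids:
--         # Ignore special tokens [CLS] and [SEP] which have word_id=None
--         if word_id is None:
--             continue
--         if word_id != current_word:
--             current_word = word_id
--             subword_mask.append(1)
--         else:
--             subword_mask.append(0)
--     return subword_mask
-- ===== SOURCE B (Python) =====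
-- def get_subword_mask(sentence_word_ids: list[int]):
--     """Run-length decomposition: split the non-None ids into maximal runs of
--     equal ids, and emit [1] + [0]*(run_length-1) for each run."""
--     ids = [w for w in sentence_word_ids if w is not None]
--     mask = []
--     i = 0
--     n = len(ids)
--     while i < n:
--         j = i + 1
--         while j < n and ids[j] == ids[i]:
--             j += 1
--         mask.append(1)
--         mask.extend([0] * (j - i - 1))
--         i = j
--     return mask
-- ===== Notes on version B (the rewrite author's own statement) =====
-- stated objective: alternative
-- what changed: Replaces A's single stateful scan threading current_word with a run-length decomposition: filter the Nones, then a two-pointer scan that finds each maximal run of equal ids and emits 1 followed by (run_length-1) zeros.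
import Mathlib
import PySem

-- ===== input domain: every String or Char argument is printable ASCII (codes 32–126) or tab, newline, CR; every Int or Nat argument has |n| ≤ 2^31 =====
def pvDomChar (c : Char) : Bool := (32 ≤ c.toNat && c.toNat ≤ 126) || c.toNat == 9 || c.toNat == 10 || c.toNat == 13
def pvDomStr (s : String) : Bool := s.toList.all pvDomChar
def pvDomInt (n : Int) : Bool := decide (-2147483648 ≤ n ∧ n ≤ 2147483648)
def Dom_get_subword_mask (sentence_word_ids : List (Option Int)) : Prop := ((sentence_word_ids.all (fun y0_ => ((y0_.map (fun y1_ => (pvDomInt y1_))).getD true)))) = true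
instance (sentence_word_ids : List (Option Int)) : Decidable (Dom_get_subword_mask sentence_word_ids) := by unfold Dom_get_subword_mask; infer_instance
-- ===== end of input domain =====

-- B replaces A's stateful element-by-element scan with a run-length decomposition: two-pointer
-- scan over the filtered ids finding each maximal run, emitting 1 ++ zeros per run; objective:
-- alternative algorithm, same cost.


-- ===== PORT A =====
-- A's loop: state (subword_mask, current_word); skip None, append 1 on change else 0.
def get_subword_mask (sentence_word_ids : List (Option Int)) : List Int :=
  (sentence_word_ids.foldl
    (fun (s : List Int × Option Int) word_id =>
      match word_id with
      | none => s
      | some w =>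
        if (some w : Option Int) ≠ s.2 then (s.1 ++ [1], some w) else (s.1 ++ [0], s.2))
    ([], none)).1

-- ===== PORT B =====
-- B's inner while loop: advance j while j < n and ids[j] == ids[i]; j stays in [0,n),
-- n = ids.length, so ids[j] is exactly ids.getD j 0.
def bInner (ids : List Int) (n : Nat) (x : Int) (j : Nat) : Nat :=
  if j < n ∧ (ids.getD j 0 == x) then bInner ids n x (j + 1) else j
termination_by n - j
decreasing_by omega

theorem bInner_ge (ids : List Int) (n : Nat) (x : Int) (j : Nat) : j ≤ bInner ids n x j := by
  unfold bInner
  split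
  · exact le_trans (Nat.le_succ j) (bInner_ge ids n x (j + 1))
  · exact le_refl j
termination_by n - j
decreasing_by simp_all; omega

-- B's outer while loop: for each run starting at i, find its end j, append 1 then (j-i-1) zeros.
def bOuter (ids : List Int) (n : Nat) (i : Nat) (mask : List Int) : List Int :=
  if h : i < n then
    let j := bInner ids n (ids.getD i 0) (i + 1)
    bOuter ids n j (mask ++ 1 :: List.replicate (j - i - 1) 0)
  else mask
termination_by n - i
decreasing_by
  have := bInner_ge ids n (ids.getD i 0) (i + 1); omega

def get_subword_mask_alt (sentence_word_ids : List (Option Int)) : List Int :=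
  let ids := sentence_word_ids.filterMap id
  bOuter ids ids.length 0 []

-- ===== PRECONDITION & SPEC =====
def Spec_get_subword_mask (sentence_word_ids : List (Option Int)) (out : List Int) : Prop := out = get_subword_mask_alt sentence_word_ids
instance (sentence_word_ids : List (Option Int)) (out : List Int) : Decidable (Spec_get_subword_mask sentence_word_ids out) := by unfold Spec_get_subword_mask; infer_instance

-- ===== CLAIM (what is proved, stated in full; the proofs are below) =====
def Claim_equal_get_subword_mask : Prop := ∀ (sentence_word_ids : List (Option Int)), Dom_get_subword_mask sentence_word_ids → Spec_get_subword_mask sentence_word_ids (get_subword_mask sentence_word_ids)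

-- ===== LEMMAS AND PROOFS =====

-- List-level view of B: maximal runs of equal ids, 1 ++ zeros per run.
def runs : List Int → List Int
  | [] => []
  | x :: rest =>
    1 :: (List.replicate (rest.takeWhile (· == x)).length 0 ++ runs (rest.dropWhile (· == x)))
termination_by l => l.length
decreasing_by
  have := List.length_dropWhile_le (· == x) rest; simp; omega

-- A's accumulator semantics: mask produced from state current_word = prev over list l.
def aAux (prev : Option Int) : List Int → List Int
  | [] => []
  | w :: rest => (if prev ≠ some w then 1 else 0) :: aAux (some w) rest

theorem foldl_eq_aAux (xs : List (Option Int)) (acc : List Int) (cur : Option Int) :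
    (xs.foldl
      (fun (s : List Int × Option Int) word_id =>
        match word_id with
        | none => s
        | some w =>
          if (some w : Option Int) ≠ s.2 then (s.1 ++ [1], some w) else (s.1 ++ [0], s.2))
      (acc, cur)).1 = acc ++ aAux cur (xs.filterMap id) := by
  induction xs generalizing acc cur with
  | nil => simp [aAux]
  | cons hd tl ih =>
    cases hd with
    | none => simpa [aAux] using ih acc cur
    | some w =>
      simp only [List.foldl_cons]
      by_cases h : (some w : Option Int) = cur
      · rw [if_neg (not_not_intro h), ih]
        simp [aAux, ← h]
      · rw [if_pos h, ih]
        simp [aAux, Ne.symm h]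

-- Consuming a block of ids all equal to the current word yields only zeros.
theorem aAux_zeros (x : Int) (t d : List Int) (ht : ∀ y ∈ t, y = x) :
    aAux (some x) (t ++ d) = List.replicate t.length 0 ++ aAux (some x) d := by
  induction t with
  | nil => simp
  | cons y t' ih =>
    have hy : y = x := ht y (List.mem_cons_self ..)
    subst hy
    simp [aAux, List.replicate_succ, ih (fun z hz => ht z (List.mem_cons_of_mem _ hz))]

theorem aAux_eq_runs (n : Nat) : ∀ l : List Int, l.length ≤ n → ∀ prev : Option Int,
    (∀ y : Int, l.head? = some y → prev ≠ some y) → aAux prev l = runs l := by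
  induction n with
  | zero =>
    intro l hl prev _
    have : l = [] := List.length_eq_zero_iff.mp (Nat.le_zero.mp hl)
    subst this; simp [aAux, runs]
  | succ n ih =>
    intro l hl prev hprev
    cases l with
    | nil => simp [aAux, runs]
    | cons x rest =>
      have hx : prev ≠ some x := hprev x rfl
      have hsplit := List.takeWhile_append_dropWhile (p := (· == x)) (l := rest)
      have htl : ∀ y ∈ rest.takeWhile (· == x), y = x := by
        intro y hy
        have := List.mem_takeWhile_imp hy
        simpa using this
      have hdlen : (rest.dropWhile (· == x)).length ≤ n := by
        have := List.length_dropWhile_le (· == x) rest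
        simp at hl; omega
      have hd : ∀ y : Int, (rest.dropWhile (· == x)).head? = some y → (some x : Option Int) ≠ some y := by
        intro y hy
        have hh := List.head?_dropWhile_not (· == x) rest
        rw [hy] at hh
        simp at hh ⊢
        omega
      calc aAux prev (x :: rest)
          = 1 :: aAux (some x) rest := by simp [aAux, hx]
        _ = 1 :: aAux (some x) (rest.takeWhile (· == x) ++ rest.dropWhile (· == x)) := by rw [hsplit]
        _ = 1 :: (List.replicate (rest.takeWhile (· == x)).length 0 ++ aAux (some x) (rest.dropWhile (· == x))) := by
            rw [aAux_zeros x _ _ htl]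
        _ = 1 :: (List.replicate (rest.takeWhile (· == x)).length 0 ++ runs (rest.dropWhile (· == x))) := by
            rw [ih _ hdlen _ hd]
        _ = runs (x :: rest) := by rw [runs]

-- bInner returns the end of the run of x starting at j.
theorem bInner_eq (ids : List Int) (x : Int) : ∀ j : Nat, j ≤ ids.length →
    bInner ids ids.length x j = j + ((ids.drop j).takeWhile (· == x)).length := by
  intro j hj
  unfold bInner
  by_cases hlt : j < ids.length
  · have hdrop : ids.drop j = ids.getD j 0 :: ids.drop (j + 1) := by
      rw [List.getD_eq_getElem?_getD, List.getElem?_eq_getElem hlt]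
      exact (List.drop_eq_getElem_cons hlt)
    by_cases heq : (ids.getD j 0 == x) = true
    · rw [if_pos ⟨hlt, heq⟩, bInner_eq ids x (j + 1) hlt, hdrop,
        List.takeWhile_cons, if_pos heq, List.length_cons]
      omega
    · rw [if_neg (fun h => heq h.2), hdrop, List.takeWhile_cons, if_neg heq, List.length_nil]
      omega
  · rw [if_neg (by omega), List.drop_of_length_le (by omega)]
    simp
termination_by j => ids.length - j
decreasing_by omega

-- bOuter from position i computes mask ++ runs of the remaining suffix.
theorem bOuter_eq (ids : List Int) : ∀ i : Nat, i ≤ ids.length → ∀ mask : List Int,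
    bOuter ids ids.length i mask = mask ++ runs (ids.drop i) := by
  intro i hi mask
  unfold bOuter
  by_cases hlt : i < ids.length
  · rw [dif_pos hlt]
    have hdrop : ids.drop i = ids.getD i 0 :: ids.drop (i + 1) := by
      rw [List.getD_eq_getElem?_getD, List.getElem?_eq_getElem hlt]
      exact (List.drop_eq_getElem_cons hlt)
    set x := ids.getD i 0 with hx
    have hj := bInner_eq ids x (i + 1) hlt
    set j := bInner ids ids.length x (i + 1) with hjdef
    set t := (ids.drop (i + 1)).takeWhile (· == x) with ht
    have hjle : j ≤ ids.length := by
      have h1 : t.length ≤ (ids.drop (i + 1)).length := (List.takeWhile_sublist (· == x)).length_le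
      have h2 : (ids.drop (i + 1)).length = ids.length - (i + 1) := List.length_drop ..
      omega
    rw [bOuter_eq ids j hjle]
    have hdj : ids.drop j = (ids.drop (i + 1)).dropWhile (· == x) := by
      rw [hj, ← List.drop_drop]
      have : (ids.drop (i+1)).drop t.length = (ids.drop (i+1)).dropWhile (· == x) := by
        conv_lhs => rw [← List.takeWhile_append_dropWhile (p := (· == x)) (l := ids.drop (i+1))]
        rw [List.drop_append_of_le_length (le_of_eq (congrArg List.length ht)), ← ht]
        simp
      exact this
    rw [hdj, hdrop, runs]
    have hlen : j - i - 1 = t.length := by omega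
    rw [hlen, ← ht]
    simp [List.append_assoc]
  · rw [dif_neg hlt, List.drop_of_length_le (by omega)]
    simp [runs]
termination_by i => ids.length - i
decreasing_by
  have := bInner_ge ids ids.length (ids.getD i 0) (i + 1); omega

-- ===== VERDICT (by name: the statement is the Claim_ definition above) =====
theorem get_subword_mask_spec : Claim_equal_get_subword_mask := by
  intro xs _
  show get_subword_mask xs = get_subword_mask_alt xs
  rw [get_subword_mask, get_subword_mask_alt, foldl_eq_aAux]
  rw [bOuter_eq _ 0 (Nat.zero_le _) []]
  simp only [List.drop_zero, List.nil_append]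
  exact aAux_eq_runs (xs.filterMap id).length _ le_rfl none (by simp)
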